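-- pv_equiv track=rewrite | github.com/Easton683/CS1300-Python | coding_nine.py | winners_fetch
-- ===== SOURCE A (Python) =====
-- def winners_fetch(winners):
--     '''Fetch each winner'''
--     # setting initial valies for iterator dict and a temp
--     iterator = 0
--     dict1 = {}
--     temp = 1
--
--     # Looping through every occurence and making an entry in the dictionary if it doesnt exist
--     while iterator < len(winners):
--         if winners[iterator] not in dict1:
--             dict1[winners[iterator]] = 1
--         else:
--             temp = dict1[winners[iterator]]
--             temp += 1
--             dict1[winners[iterator]] = temp
--
--         iterator += 1
--     return dict1
-- ===== SOURCE B (Python) =====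
-- def winners_fetch(winners):
--     '''Fetch each winner'''
--     # distinct winners in first-occurrence order, each counted by a scan
--     return {w: winners.count(w) for w in dict.fromkeys(winners)}
-- ===== Notes on version B (the rewrite author's own statement) =====
-- stated objective: idiomatic
-- what changed: Replaces the index-driven while loop that accumulates a dict with a one-line dict comprehension over the distinct winners (dict.fromkeys) counting each with list.count.
import Mathlib
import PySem

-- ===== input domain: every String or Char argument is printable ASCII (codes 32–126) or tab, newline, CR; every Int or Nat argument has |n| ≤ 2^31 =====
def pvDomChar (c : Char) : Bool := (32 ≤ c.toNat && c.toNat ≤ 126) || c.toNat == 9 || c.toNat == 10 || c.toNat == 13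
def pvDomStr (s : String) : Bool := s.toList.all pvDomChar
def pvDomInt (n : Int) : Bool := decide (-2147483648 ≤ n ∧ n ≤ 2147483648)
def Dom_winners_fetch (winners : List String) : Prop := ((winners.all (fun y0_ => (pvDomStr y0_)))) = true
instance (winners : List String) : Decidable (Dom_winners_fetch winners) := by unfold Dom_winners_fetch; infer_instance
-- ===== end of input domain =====

-- B: idiomatic dict comprehension over distinct winners (dict.fromkeys) counting with list.count, instead of A's index-driven while loop accumulating a dict.


-- ===== PORT A =====
def winners_fetch (winners : List String) : List (String × Int) :=
  (winners.foldl
    (fun d w =>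
      if !d.contains w then
        d.insert w 1
      else
        let temp := d.getD w 0
        d.insert w (temp + 1))
    PySem.Dict.empty).items

-- ===== PORT B =====
def winners_fetch_alt (winners : List String) : List (String × Int) :=
  (PySem.List.dedup winners).map (fun w => (w, (winners.count w : Int)))

-- ===== PRECONDITION & SPEC =====
def Spec_winners_fetch (winners : List String) (out : List (String × Int)) : Prop := out = winners_fetch_alt winners
instance (winners : List String) (out : List (String × Int)) : Decidable (Spec_winners_fetch winners out) := by unfold Spec_winners_fetch; infer_instance

-- ===== CLAIM (what is proved, stated in full; the proofs are below) =====
def Claim_equal_winners_fetch : Prop := ∀ (winners : List String), Dom_winners_fetch winners → Spec_winners_fetch winners (winners_fetch winners)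

-- ===== LEMMAS AND PROOFS =====
lemma step_eq (d : PySem.Dict String Int) (w : String) :
    (if !d.contains w then d.insert w 1
     else let temp := d.getD w 0; d.insert w (temp + 1))
    = d.insert w (d.getD w 0 + 1) := by
  by_cases h : d.contains w
  · simp [h]
  · simp [h, PySem.Dict.getD,
      (PySem.Dict.get?_eq_none_iff_contains d w).mpr (by simpa using h)]

-- ===== VERDICT (by name: the statement is the Claim_ definition above) =====
theorem winners_fetch_spec : Claim_equal_winners_fetch := by
  intro winners _
  unfold Spec_winners_fetch winners_fetch winners_fetch_alt
  have h1 := List.foldl_ext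
    (fun (d : PySem.Dict String Int) w =>
      if !d.contains w then d.insert w 1
      else let temp := d.getD w 0; d.insert w (temp + 1))
    (fun d w => d.insert w (d.getD w 0 + 1))
    PySem.Dict.empty (l := winners) (fun d w _ => step_eq d w)
  rw [h1, PySem.Dict.foldl_insert_getD_add_one_eq_counter,
    PySem.Dict.items_counter, PySem.List.dedup_eq_ofList]
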